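-- pv_equiv track=rewrite | github.com/keithrozario/advent-of-code | 09/solution-refactored.py | defragment
-- ===== SOURCE A (Python) =====
-- def defragment(physical_map):
--     """Defragments the physical map by moving files to the left."""
--     next_free = 0
--     for i in range(len(physical_map)):
--         if physical_map[i] != '.':
--             if i != next_free:
--                 physical_map[next_free], physical_map[i] = physical_map[i], physical_map[next_free]
--             next_free += 1
--     return physical_map
-- ===== SOURCE B (Python) =====
-- def defragment(physical_map):
--     """Defragments the physical map by moving files to the left."""
--     kept = [c for c in physical_map if c != '.']
--     physical_map[:len(kept)] = kept
--     physical_map[len(kept):] = ['.'] * (len(physical_map) - len(kept))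
--     return physical_map
-- ===== Notes on version B (the rewrite author's own statement) =====
-- stated objective: simpler
-- what changed: Replaces the two-pointer swap loop with a filter that collects the non-dot elements and a slice assignment that writes them back followed by dots, mutating the same list in place.
import Mathlib
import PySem

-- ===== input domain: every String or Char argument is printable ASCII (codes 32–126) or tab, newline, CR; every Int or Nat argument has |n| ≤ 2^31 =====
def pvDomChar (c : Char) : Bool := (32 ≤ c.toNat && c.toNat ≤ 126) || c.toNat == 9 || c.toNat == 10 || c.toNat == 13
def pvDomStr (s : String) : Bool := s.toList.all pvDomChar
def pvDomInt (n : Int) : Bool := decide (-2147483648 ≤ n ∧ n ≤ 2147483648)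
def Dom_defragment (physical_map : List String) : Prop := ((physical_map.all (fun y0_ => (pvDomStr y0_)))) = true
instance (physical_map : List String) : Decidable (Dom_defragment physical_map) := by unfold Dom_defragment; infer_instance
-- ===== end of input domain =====

-- B replaces A's two-pointer swap loop by filter-then-overwrite (simpler); both Pythons
-- mutate the argument list in place — the equivalence proved here is about the return value.


-- ===== PORT A =====
-- one iteration of A's for-loop body at index i (state: current list, next_free);
-- physical_map[i] with 0 ≤ i < len is always in range, ported with getD (exact here)
def defragStep (st : List String × Nat) (i : Nat) : List String × Nat :=
  let l := st.1
  let nf := st.2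
  if l.getD i "" ≠ "." then
    (if i ≠ nf then (l.set nf (l.getD i "")).set i (l.getD nf "") else l, nf + 1)
  else
    st

def defragment (physical_map : List String) : List String :=
  ((PySem.List.pyRange 0 physical_map.length 1).foldl
    (fun st i => defragStep st i.toNat) (physical_map, 0)).1

-- ===== PORT B =====
def defragment_alt (physical_map : List String) : List String :=
  let kept := physical_map.filter (fun c => c ≠ ".")
  kept ++ List.replicate (physical_map.length - kept.length) "."

-- ===== PRECONDITION & SPEC =====
def Spec_defragment (physical_map : List String) (out : List String) : Prop := out = defragment_alt physical_map
instance (physical_map : List String) (out : List String) : Decidable (Spec_defragment physical_map out) := by unfold Spec_defragment; infer_instance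

-- ===== CLAIM (what is proved, stated in full; the proofs are below) =====
def Claim_equal_defragment : Prop := ∀ (physical_map : List String), Dom_defragment physical_map → Spec_defragment physical_map (defragment physical_map)

-- ===== LEMMAS AND PROOFS =====

-- the loop invariant state after the first k iterations
def invState (pm : List String) (k : Nat) : List String × Nat :=
  let F := (pm.take k).filter (fun c => c ≠ ".")
  (F ++ List.replicate (k - F.length) "." ++ pm.drop k, F.length)

-- one iteration on the invariant shape: the scanned index holds x, positions
-- F.length .. F.length+m-1 hold dots
theorem stepA_shape (F : List String) (m : Nat) (x : String) (rest : List String) :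
    defragStep (F ++ List.replicate m "." ++ x :: rest, F.length) (F.length + m) =
      if x = "." then (F ++ List.replicate m "." ++ x :: rest, F.length)
      else ((F ++ [x]) ++ List.replicate m "." ++ rest, F.length + 1) := by
  have hx : (F ++ List.replicate m "." ++ x :: rest).getD (F.length + m) "" = x := by
    rw [List.append_assoc, List.getD_append_right _ _ _ _ (by omega)]
    have h1 : F.length + m - F.length = m := by omega
    rw [h1, List.getD_append_right _ _ _ _ (by simp)]
    simp
  cases m with
  | zero =>
    simp only [List.replicate_zero, Nat.add_zero] at hx ⊢
    unfold defragStep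
    simp only [hx]
    by_cases hdot : x = "."
    · simp [hdot]
    · simp [hdot]
  | succ m' =>
    have hne : F.length + (m' + 1) ≠ F.length := by omega
    have hnf : (F ++ List.replicate (m' + 1) "." ++ x :: rest).getD F.length "" = "." := by
      rw [List.append_assoc, List.getD_append_right _ _ _ _ (le_refl _)]
      simp [List.replicate_succ]
    unfold defragStep
    simp only [hx, hnf]
    by_cases hdot : x = "."
    · simp [hdot]
    · simp only [ne_eq, hdot, not_false_iff, if_true, if_pos hne]
      have hset1 : (F ++ List.replicate (m' + 1) "." ++ x :: rest).set F.length x =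
          F ++ x :: List.replicate m' "." ++ x :: rest := by
        rw [List.append_assoc, List.set_append_right _ _ (le_refl _)]
        simp [List.replicate_succ]
      rw [hset1]
      have hset2 : (F ++ x :: List.replicate m' "." ++ x :: rest).set (F.length + (m' + 1)) "." =
          F ++ x :: List.replicate m' "." ++ "." :: rest := by
        rw [List.set_append_right _ _ (by simp)]
        have h0 : F.length + (m' + 1) - (F ++ x :: List.replicate m' ".").length = 0 := by
          simp
        rw [h0]
        simp
      rw [hset2]
      simp [List.replicate_succ', List.append_assoc]

theorem filter_take_length_le (pm : List String) (k : Nat) :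
    ((pm.take k).filter (fun c => c ≠ ".")).length ≤ k := by
  calc ((pm.take k).filter (fun c => c ≠ ".")).length ≤ (pm.take k).length :=
        List.length_filter_le _ _
    _ ≤ k := by simp

theorem inv_step (pm : List String) (k : Nat) (hk : k < pm.length) :
    defragStep (invState pm k) k = invState pm (k + 1) := by
  have hFk := filter_take_length_le pm k
  have hdrop : pm.drop k = pm[k] :: pm.drop (k + 1) := (List.drop_eq_getElem_cons hk).trans rfl
  have htake : pm.take (k + 1) = pm.take k ++ [pm[k]] := by
    rw [List.take_add_one]; simp [hk]
  have hsplit : k = ((pm.take k).filter (fun c => c ≠ ".")).length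
      + (k - ((pm.take k).filter (fun c => c ≠ ".")).length) := by omega
  -- rewrite the LHS into the shape of stepA_shape
  have lhs_eq : defragStep (invState pm k) k =
      defragStep ((pm.take k).filter (fun c => c ≠ ".")
          ++ List.replicate (k - ((pm.take k).filter (fun c => c ≠ ".")).length) "."
          ++ pm[k] :: pm.drop (k + 1),
        ((pm.take k).filter (fun c => c ≠ ".")).length)
        (((pm.take k).filter (fun c => c ≠ ".")).length
          + (k - ((pm.take k).filter (fun c => c ≠ ".")).length)) := by
    rw [invState]
    rw [← hdrop]
    rw [← hsplit]
  rw [lhs_eq, stepA_shape]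
  by_cases hdot : pm[k] = "."
  · rw [if_pos hdot, invState, htake]
    have hfil : (pm.take k ++ [pm[k]]).filter (fun c => c ≠ ".") =
        (pm.take k).filter (fun c => c ≠ ".") := by
      rw [List.filter_append]; simp [hdot]
    rw [hfil]
    have hrep : k + 1 - ((pm.take k).filter (fun c => c ≠ ".")).length =
        (k - ((pm.take k).filter (fun c => c ≠ ".")).length) + 1 := by omega
    rw [hrep, List.replicate_succ']
    simp [hdot]
  · rw [if_neg hdot, invState, htake]
    have hfil : (pm.take k ++ [pm[k]]).filter (fun c => c ≠ ".") =
        (pm.take k).filter (fun c => c ≠ ".") ++ [pm[k]] := by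
      rw [List.filter_append]; simp [hdot]
    rw [hfil]
    have hrep : k + 1 - ((pm.take k).filter (fun c => c ≠ ".") ++ [pm[k]]).length =
        k - ((pm.take k).filter (fun c => c ≠ ".")).length := by
      simp
    rw [hrep]
    simp

theorem inv_loop (pm : List String) : ∀ (k : Nat), k ≤ pm.length →
    (List.range k).foldl (fun st i => defragStep st i) (pm, 0) = invState pm k := by
  intro k
  induction k with
  | zero => intro _; simp [invState]
  | succ k ih =>
    intro hk
    rw [List.range_succ, List.foldl_append, ih (by omega)]
    simp only [List.foldl_cons, List.foldl_nil]
    exact inv_step pm k (by omega)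

-- ===== VERDICT (by name: the statement is the Claim_ definition above) =====
theorem defragment_spec : Claim_equal_defragment := by
  intro pm _
  show defragment pm = defragment_alt pm
  unfold defragment
  rw [PySem.List.pyRange_one]
  simp only [Int.sub_zero, Int.toNat_natCast, List.foldl_map, Int.zero_add]
  rw [inv_loop pm pm.length (le_refl _)]
  simp [invState, defragment_alt]
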